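-- pv_equiv track=rewrite | github.com/TsachMa/ChIPS | src/data/fix_nextra_bands.py | get_existing_nextra_bands
-- ===== SOURCE A (Python) =====
-- def get_existing_nextra_bands(file_lines):
--     existing_nextra_bands = 0
--     for line in file_lines:
--         if "nextra_bands" in line:
--             for item in line.split():
--                 if item.isdigit():
--                     existing_nextra_bands = int(item)
--     return existing_nextra_bands
-- ===== SOURCE B (Python) =====
-- def get_existing_nextra_bands(file_lines):
--     for line in reversed(list(file_lines)):
--         if "nextra_bands" in line:
--             last = next((item for item in reversed(line.split()) if item.isdigit()), None)
--             if last is not None: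
--                 return int(last)
--     return 0
-- ===== Notes on version B (the rewrite author's own statement) =====
-- stated objective: alternative
-- what changed: Replaces A's forward fold with a running accumulator by a reverse scan that returns early: walk the lines back-to-front and, at the first line containing 'nextra_bands' whose whitespace tokens include a digit token, return the last such token as an int; 0 if none.
import Mathlib
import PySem

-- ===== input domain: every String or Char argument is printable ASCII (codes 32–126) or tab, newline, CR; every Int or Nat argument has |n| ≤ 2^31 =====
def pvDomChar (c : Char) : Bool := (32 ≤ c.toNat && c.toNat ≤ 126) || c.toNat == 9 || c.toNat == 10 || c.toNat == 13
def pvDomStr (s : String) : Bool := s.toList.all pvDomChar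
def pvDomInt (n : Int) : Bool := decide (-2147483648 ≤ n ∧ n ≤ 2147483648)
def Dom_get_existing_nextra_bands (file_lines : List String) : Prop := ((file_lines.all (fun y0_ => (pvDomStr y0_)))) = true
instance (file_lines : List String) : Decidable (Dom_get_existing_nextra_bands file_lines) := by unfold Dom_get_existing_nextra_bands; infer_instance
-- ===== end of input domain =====

-- B replaces A's forward fold with a running accumulator by a reverse scan with early return:
-- it returns the last digit token of the last 'nextra_bands' line that has one (0 if none).

-- ===== PORT A =====
-- A: fold over the lines, updating the accumulator to int(item) for every digit token
-- of every line containing "nextra_bands".  (int(item) never raises on a token with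
-- item.isdigit(), so .getD 0 below is never taken.)
def get_existing_nextra_bands (file_lines : List String) : Int :=
  file_lines.foldl
    (fun acc line =>
      if PySem.Str.isIn "nextra_bands" line then
        (PySem.Str.split₀ line).foldl
          (fun a item => if PySem.Str.strIsdigit item then (PySem.Int.ofStr? item).getD 0 else a)
          acc
      else acc)
    0

-- ===== PORT B =====
-- B: scan the reversed line list; at the first matching line whose reversed token list
-- contains a digit token, return it as an int; if the scan finishes, return 0.
def pvAltGo (lines : List String) : Int :=
  match lines with
  | [] => 0
  | line :: rest =>
    if PySem.Str.isIn "nextra_bands" line then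
      match (PySem.Str.split₀ line).reverse.find? (fun item => PySem.Str.strIsdigit item) with
      | some t => (PySem.Int.ofStr? t).getD 0
      | none => pvAltGo rest
    else pvAltGo rest

def get_existing_nextra_bands_alt (file_lines : List String) : Int :=
  pvAltGo file_lines.reverse

-- ===== PRECONDITION & SPEC =====
def Spec_get_existing_nextra_bands (file_lines : List String) (out : Int) : Prop := out = get_existing_nextra_bands_alt file_lines
instance (file_lines : List String) (out : Int) : Decidable (Spec_get_existing_nextra_bands file_lines out) := by unfold Spec_get_existing_nextra_bands; infer_instance

-- ===== CLAIM (what is proved, stated in full; the proofs are below) =====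
def Claim_equal_get_existing_nextra_bands : Prop := ∀ (file_lines : List String), Dom_get_existing_nextra_bands file_lines → Spec_get_existing_nextra_bands file_lines (get_existing_nextra_bands file_lines)

-- ===== LEMMAS AND PROOFS =====

-- the per-line result A's inner loop leaves, as an option (none = accumulator untouched)
def pvLineRes? (line : String) : Option Int :=
  if PySem.Str.isIn "nextra_bands" line then
    ((PySem.Str.split₀ line).reverse.find? (fun item => PySem.Str.strIsdigit item)).map
      (fun t => (PySem.Int.ofStr? t).getD 0)
  else none

def pvRes? (lines : List String) : Option Int :=
  match lines with
  | [] => none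
  | line :: rest => (pvLineRes? line).or (pvRes? rest)

theorem pvAltGo_eq_res (l : List String) : pvAltGo l = (pvRes? l).getD 0 := by
  induction l with
  | nil => rfl
  | cons x xs ih =>
    simp only [pvAltGo, pvRes?, pvLineRes?]
    split_ifs with h
    · cases hf : (PySem.Str.split₀ x).reverse.find? (fun item => PySem.Str.strIsdigit item) <;>
        simp [Option.or, ih]
    · simpa [Option.or] using ih

-- A's inner token loop computes the last digit token (found via find? on the reversed tokens)
theorem pvInner_eq (items : List String) (acc : Int) :
    items.foldl (fun a item => if PySem.Str.strIsdigit item then (PySem.Int.ofStr? item).getD 0 else a) acc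
      = match items.reverse.find? (fun item => PySem.Str.strIsdigit item) with
        | some t => (PySem.Int.ofStr? t).getD 0
        | none => acc := by
  induction items generalizing acc with
  | nil => rfl
  | cons x xs ih =>
    simp only [List.foldl_cons, List.reverse_cons, List.find?_append, ih]
    cases hf : xs.reverse.find? (fun item => PySem.Str.strIsdigit item) with
    | some t => simp [Option.or]
    | none =>
      simp only [Option.or, List.find?]
      by_cases hd : PySem.Chars.strIsdigit x.toList <;> simp [hd]

theorem pvRes?_append_singleton (l : List String) (x : String) :
    pvRes? (l ++ [x]) = (pvRes? l).or (pvRes? [x]) := by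
  induction l with
  | nil => rfl
  | cons y ys ih =>
    simp only [List.cons_append, pvRes?, ih, Option.or_assoc]

theorem pvFold_eq (lines : List String) (acc : Int) :
    lines.foldl
      (fun acc line =>
        if PySem.Str.isIn "nextra_bands" line then
          (PySem.Str.split₀ line).foldl
            (fun a item => if PySem.Str.strIsdigit item then (PySem.Int.ofStr? item).getD 0 else a)
            acc
        else acc)
      acc
      = (pvRes? lines.reverse).getD acc := by
  induction lines generalizing acc with
  | nil => rfl
  | cons x xs ih =>
    simp only [List.foldl_cons, List.reverse_cons, ih, pvRes?_append_singleton]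
    cases hf : pvRes? xs.reverse with
    | some n => simp [Option.or]
    | none =>
      simp only [Option.or, pvRes?, pvLineRes?, pvInner_eq]
      split_ifs with h
      · cases hg : (PySem.Str.split₀ x).reverse.find? (fun item => PySem.Str.strIsdigit item) <;>
          simp
      · simp

-- ===== VERDICT (by name: the statement is the Claim_ definition above) =====
theorem get_existing_nextra_bands_spec : Claim_equal_get_existing_nextra_bands := by
  intro fl _
  show _ = _
  rw [get_existing_nextra_bands, get_existing_nextra_bands_alt, pvFold_eq, pvAltGo_eq_res]
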